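-- pv_equiv track=rewrite | github.com/terr1blec/FF-ASDNET | DataProcess/staclassification.py | hard
-- ===== SOURCE A (Python) =====
-- def hard(participant, sample, samplelabel, samplepre):
--     prelabel = []
--     for i in range(len(participant) - 1):
--         record0 = []
--         e = 0
--         for j in range(len(sample)):
--             if sample[j][:-1] == participant[i]:
--                 record0.append(samplelabel[j])
--         if record0.count(1) >= record0.count(0):
--             prelabel.append(1)
--         else:
--             prelabel.append(0)
--     return prelabel
-- ===== SOURCE B (Python) =====
-- def hard(participant, sample, samplelabel, samplepre):
--     # One pass over the samples builds key -> (count of label 1, count of label 0);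
--     # each participant is then a single dict lookup.
--     counts = {}
--     for key, lab in zip(sample, samplelabel):
--         k = tuple(key[:-1])
--         c1, c0 = counts.get(k, (0, 0))
--         counts[k] = (c1 + (1 if lab == 1 else 0), c0 + (1 if lab == 0 else 0))
--     prelabel = []
--     for p in participant[:-1]:
--         c1, c0 = counts.get(tuple(p), (0, 0))
--         prelabel.append(1 if c1 >= c0 else 0)
--     return prelabel
-- ===== Notes on version B (the rewrite author's own statement) =====
-- stated objective: faster
-- what changed: B replaces A's per-participant rescan of all samples by one pass that indexes samples into a dict keyed by sample[:-1] holding (count of label 1, count of label 0), so each participant becomes a single lookup.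
import Mathlib
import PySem

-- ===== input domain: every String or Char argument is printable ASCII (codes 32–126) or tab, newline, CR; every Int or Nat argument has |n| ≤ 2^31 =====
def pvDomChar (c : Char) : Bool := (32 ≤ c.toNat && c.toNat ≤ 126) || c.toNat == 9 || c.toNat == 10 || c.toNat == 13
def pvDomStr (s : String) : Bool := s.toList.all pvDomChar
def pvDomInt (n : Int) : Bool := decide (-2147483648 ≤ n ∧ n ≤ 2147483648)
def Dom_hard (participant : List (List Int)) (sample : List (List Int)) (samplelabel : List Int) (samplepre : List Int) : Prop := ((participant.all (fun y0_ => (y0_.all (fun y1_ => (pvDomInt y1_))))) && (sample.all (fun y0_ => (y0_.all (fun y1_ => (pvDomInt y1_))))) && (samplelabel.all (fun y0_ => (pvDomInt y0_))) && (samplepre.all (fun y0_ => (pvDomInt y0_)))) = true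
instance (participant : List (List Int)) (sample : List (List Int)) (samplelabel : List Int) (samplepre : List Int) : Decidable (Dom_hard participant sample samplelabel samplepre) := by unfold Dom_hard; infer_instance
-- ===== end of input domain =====

-- B builds a dict of (count of 1s, count of 0s) per sample key in one pass, replacing A's
-- per-participant rescan of all samples (objective: faster). Equivalence is about the return value.

-- ===== PORT A =====
def hard (participant : List (List Int)) (sample : List (List Int)) (samplelabel : List Int) (samplepre : List Int) : List Int :=
  (List.range (participant.length - 1)).foldl (fun prelabel i =>
    let record0 : List Int :=
      (List.range sample.length).foldl (fun r j =>
        if (sample.getD j []).dropLast = participant.getD i [] then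
          r ++ [samplelabel.getD j 0]
        else r) []
    prelabel ++ [if record0.count 1 ≥ record0.count 0 then 1 else 0]) []

-- ===== PORT B =====
def hard_alt (participant : List (List Int)) (sample : List (List Int)) (samplelabel : List Int) (samplepre : List Int) : List Int :=
  let counts : PySem.Dict (List Int) (Int × Int) :=
    (sample.zip samplelabel).foldl (fun d q =>
      let k := q.1.dropLast
      let c := d.getD k (0, 0)
      d.insert k (c.1 + (if q.2 = 1 then 1 else 0), c.2 + (if q.2 = 0 then 1 else 0)))
      PySem.Dict.empty
  participant.dropLast.map (fun p =>
    let c := counts.getD p (0, 0)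
    if c.1 ≥ c.2 then 1 else 0)

-- ===== PRECONDITION & SPEC =====
-- Pre_ excludes exactly the inputs on which A raises IndexError: a sample whose key prefix
-- matches some used participant but whose index has no entry in samplelabel.
def Pre_hard (participant : List (List Int)) (sample : List (List Int)) (samplelabel : List Int) (samplepre : List Int) : Prop :=
  ∀ j < sample.length, (sample.getD j []).dropLast ∈ participant.dropLast → j < samplelabel.length
instance (participant : List (List Int)) (sample : List (List Int)) (samplelabel : List Int) (samplepre : List Int) : Decidable (Pre_hard participant sample samplelabel samplepre) := by unfold Pre_hard; infer_instance

def pvWitness_hard : List (List Int) × List (List Int) × List Int × List Int :=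
  ([[1], [0]], [[1, 2]], [1], [0])

def Spec_hard (participant : List (List Int)) (sample : List (List Int)) (samplelabel : List Int) (samplepre : List Int) (out : List Int) : Prop := out = hard_alt participant sample samplelabel samplepre
instance (participant : List (List Int)) (sample : List (List Int)) (samplelabel : List Int) (samplepre : List Int) (out : List Int) : Decidable (Spec_hard participant sample samplelabel samplepre out) := by unfold Spec_hard; infer_instance

-- ===== CLAIM (what is proved, stated in full; the proofs are below) =====
def Claim_equal_hard : Prop := ∀ (participant : List (List Int)) (sample : List (List Int)) (samplelabel : List Int) (samplepre : List Int), Dom_hard participant sample samplelabel samplepre → Pre_hard participant sample samplelabel samplepre → Spec_hard participant sample samplelabel samplepre (hard participant sample samplelabel samplepre)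
-- ===== LEMMAS AND PROOFS =====

-- the number of samples with key k and label v, over the zipped (sample, label) list
def cntKV (k : List Int) (v : Int) (L : List (List Int × Int)) : Nat :=
  L.countP (fun q => decide (q.1.dropLast = k) && decide (q.2 = v))

-- B's dict invariant: after folding the zipped list, the entry at k holds the two counts
lemma dict_inv (L : List (List Int × Int)) (d : PySem.Dict (List Int) (Int × Int)) (k : List Int) :
    ((L.foldl (fun d q =>
        let k' := q.1.dropLast
        let c := d.getD k' (0, 0)
        d.insert k' (c.1 + (if q.2 = 1 then 1 else 0), c.2 + (if q.2 = 0 then 1 else 0))) d).getD k (0, 0))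
    = ((d.getD k (0, 0)).1 + (cntKV k 1 L : Int), (d.getD k (0, 0)).2 + (cntKV k 0 L : Int)) := by
  induction L generalizing d with
  | nil => simp [cntKV]
  | cons q L ih =>
      simp only [List.foldl_cons, ih, cntKV, List.countP_cons]
      by_cases hk : q.1.dropLast = k
      · subst hk
        simp [PySem.Dict.getD_insert_self]
        constructor <;> by_cases h1 : q.2 = 1 <;> by_cases h0 : q.2 = 0 <;>
          simp_all <;> ring
      · simp [PySem.Dict.getD_insert_of_ne _ _ _ (Ne.symm hk), hk]

-- A's inner count: under the in-range condition, counting v in record0 counts the zipped pairs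
lemma inner_count (xs : List (List Int)) (ys : List Int) (p : List Int) (v : Int)
    (H : ∀ j < xs.length, (xs.getD j []).dropLast = p → j < ys.length) :
    (List.range xs.length).countP
        (fun j => decide ((xs.getD j []).dropLast = p) && decide (ys.getD j 0 = v))
      = cntKV p v (xs.zip ys) := by
  induction xs generalizing ys with
  | nil => simp [cntKV]
  | cons x xs ih =>
      simp only [List.length_cons]
      rw [List.range_succ_eq_map]
      cases ys with
      | nil =>
          have hx : ¬ x.dropLast = p := fun h => by
            have h0 := H 0 (by simp) (by simpa using h); simp at h0
          rw [List.countP_eq_zero.2 ?_]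
          · simp [cntKV]
          · intro j hj
            simp only [List.mem_cons, List.mem_map] at hj
            rcases hj with rfl | ⟨i, hi, rfl⟩
            · simp [hx]
            · have hlt := List.mem_range.1 hi
              have hni : ¬ (xs.getD i []).dropLast = p := fun h => by
                have h0 := H (i + 1) (by simp [hlt]) (by simpa using h); simp at h0
              simp only [List.getD] at hni ⊢
              simp [hni]
      | cons y ys =>
          simp only [List.countP_cons, List.countP_map, Function.comp_def,
            List.getD_cons_succ, List.getD_cons_zero]
          rw [ih ys (fun j hj hm => by
            have h2 := H (j + 1) (by simp [Nat.succ_lt_succ hj]) (by simpa using hm)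
            simpa using h2)]
          simp [cntKV, List.countP_cons]

-- turn an index loop over range n into a map over the taken prefix
lemma map_range_getD {α β : Type} (xs : List α) (n : Nat) (d : α) (g : α → β) (hn : n ≤ xs.length) :
    (List.range n).map (fun i => g (xs.getD i d)) = (xs.take n).map g := by
  induction n with
  | zero => simp
  | succ n ih =>
      rw [List.range_succ, List.map_append, ih (by omega)]
      have h1 : xs.take (n + 1) = xs.take n ++ [xs[n]] := by
        rw [List.take_add_one, List.getElem?_eq_getElem (by omega)]
        rfl
      rw [h1, List.map_append]
      simp only [List.map_cons, List.map_nil,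
        List.getD_eq_getElem xs d (show n < xs.length by omega)]
      rfl

-- count of v in the filtered-mapped record0, as a countP over range
lemma record0_count (xs : List (List Int)) (ys : List Int) (p : List Int) (v : Int) :
    (((List.range xs.length).filter (fun j => decide ((xs.getD j []).dropLast = p))).map
        (fun j => ys.getD j 0)).count v
      = (List.range xs.length).countP
          (fun j => decide ((xs.getD j []).dropLast = p) && decide (ys.getD j 0 = v)) := by
  rw [List.count_eq_countP, List.countP_map, List.countP_filter]
  apply List.countP_congr
  intro j _
  simp [Function.comp, and_comm]

-- ===== VERDICT (by name: the statement is the Claim_ definition above) =====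
theorem hard_spec : Claim_equal_hard := by
  intro participant sample samplelabel samplepre _ hpre
  unfold Spec_hard hard hard_alt
  -- outer loop: fold of appends = map over range, then map over the dropLast prefix
  rw [PySem.List.foldl_append_singleton_eq_map]
  rw [map_range_getD participant (participant.length - 1) []
        (fun p => if ((((List.range sample.length).foldl (fun r j =>
            if (sample.getD j []).dropLast = p then r ++ [samplelabel.getD j 0] else r) []).count 1)
            ≥ (((List.range sample.length).foldl (fun r j =>
            if (sample.getD j []).dropLast = p then r ++ [samplelabel.getD j 0] else r) []).count 0))
          then (1 : Int) else 0)
        (by omega)]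
  rw [← List.dropLast_eq_take]
  simp only [List.nil_append]
  apply List.map_congr_left
  intro p hp
  have H : ∀ j < sample.length, (sample.getD j []).dropLast = p → j < samplelabel.length :=
    fun j hj hm => hpre j hj (hm ▸ hp)
  have hfold : ∀ v : Int,
      (((List.range sample.length).foldl (fun r j =>
          if (sample.getD j []).dropLast = p then r ++ [samplelabel.getD j 0] else r) []).count v)
        = cntKV p v (sample.zip samplelabel) := by
    intro v
    have hconv : (List.range sample.length).foldl (fun r j =>
          if (sample.getD j []).dropLast = p then r ++ [samplelabel.getD j 0] else r) []
        = ((List.range sample.length).filter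
            (fun j => decide ((sample.getD j []).dropLast = p))).map (fun j => samplelabel.getD j 0) := by
      have h := PySem.List.foldl_append_if (fun j => decide ((sample.getD j []).dropLast = p))
        (fun j => samplelabel.getD j 0) (List.range sample.length) []
      simpa using h
    rw [hconv, record0_count sample samplelabel p v, inner_count sample samplelabel p v H]
  rw [hfold 1, hfold 0, dict_inv]
  have hemp : (PySem.Dict.empty : PySem.Dict (List Int) (Int × Int)).getD p (0, 0) = (0, 0) := rfl
  rw [hemp]
  split_ifs with h1 h2 <;> first | rfl | (exfalso; simp at *; omega)
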